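-- pv_equiv track=rewrite | github.com/RaphaFang/Coding-Challenges | codewar_challenges/5kyu/5kyu_Bananas.py | find_bananas
-- ===== SOURCE A (Python) =====
-- def find_bananas(s):
--     target = "banana"
--     results = []
--
--     def recurse(subseq, idx, path):
--         if idx == len(target):  # If we have completed the word "banana"
--             results.append("".join(path))  # Join the path into a string and add to results
--             return
--         # Find the next occurrence of target[idx] in subseq
--         for i in range(len(subseq)):
--             if subseq[i] == target[idx]:
--                 # Construct the new path including '-' for skipped characters
--                 new_path = path + ['-' * i + target[idx]]
--                 # Continue with the remaining part of subseq and target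
--                 recurse(subseq[i+1:], idx + 1, new_path)
--
--     recurse(s, 0, [])
--
--     # Process results to match the required output format: concatenate all segments into one string
--     processed_results = [''.join(result) + '-' * (len(s) - len(''.join(result))) for result in results]
--     return processed_results
-- ===== SOURCE B (Python) =====
-- def find_bananas(s):
--     n = len(s)
--     # breadth-wise subsequence enumeration: worklist of increasing index lists
--     partials = [[]]
--     for ch in "banana":
--         partials = [p + [i]
--                     for p in partials
--                     for i in range(p[-1] + 1 if p else 0, n)
--                     if s[i] == ch]
--     out = []
--     for idxs in partials:
--         buf = ['-'] * n
--         for ch, i in zip("banana", idxs):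
--             buf[i] = ch
--         out.append(''.join(buf))
--     return out
-- ===== Notes on version B (the rewrite author's own statement) =====
-- stated objective: alternative
-- what changed: Replaced A's depth-first recursion over string suffixes (nested per-level scans building path segments) by an iterative breadth-wise worklist of increasing index lists, one pass per target letter, each complete index list then rendered into a dash buffer.
import Mathlib
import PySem

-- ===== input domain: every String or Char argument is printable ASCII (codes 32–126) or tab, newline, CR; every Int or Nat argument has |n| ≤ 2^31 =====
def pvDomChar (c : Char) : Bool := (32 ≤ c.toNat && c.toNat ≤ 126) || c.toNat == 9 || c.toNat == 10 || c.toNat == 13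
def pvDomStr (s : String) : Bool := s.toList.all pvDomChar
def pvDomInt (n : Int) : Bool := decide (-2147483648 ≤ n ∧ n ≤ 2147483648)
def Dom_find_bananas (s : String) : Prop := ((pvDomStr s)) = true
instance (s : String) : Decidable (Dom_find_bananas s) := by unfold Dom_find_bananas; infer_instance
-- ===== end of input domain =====

-- B is an iterative breadth-wise worklist enumeration instead of A's nested DFS recursion
-- (objective: alternative decomposition, similar cost); return values proved equal on Dom.

-- ===== PORT A =====
-- A's DFS: recurse(subseq, idx, path); the for-loop over range(len(subseq)) is loopA,
-- walking the suffix while counting i; results appended in DFS order = list concatenation.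
def pvTargetA : List Char := "banana".toList

mutual
def recA (idx : Nat) (path : List (List Char)) (subseq : List Char) : List (List Char) :=
  if idx = pvTargetA.length then [path.flatten]
  else loopA idx path 0 subseq
termination_by (subseq.length, 1)

def loopA (idx : Nat) (path : List (List Char)) (i : Nat) : List Char → List (List Char)
  | [] => []
  | c :: rest =>
      (if c = pvTargetA.getD idx ' ' then
        recA (idx + 1) (path ++ [List.replicate i '-' ++ [c]]) rest
      else []) ++ loopA idx path (i + 1) rest
termination_by subseq => (subseq.length, 0)
end

def find_bananas (s : String) : List String :=
  (recA 0 [] s.toList).map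
    (fun r => String.mk (r ++ List.replicate (s.toList.length - r.length) '-'))

-- ===== PORT B =====
-- Source B: worklist of increasing index lists, one pass per letter of "banana",
-- then each complete index list is rendered into a dash buffer.
def pvTargetB : List Char := "banana".toList

def stepB (l : List Char) (n : Nat) (partials : List (List Nat)) (ch : Char) : List (List Nat) :=
  partials.flatMap (fun p =>
    (((List.range' (match p.getLast? with | some j => j + 1 | none => 0)
        (n - (match p.getLast? with | some j => j + 1 | none => 0))).filter
          (fun i => l.getD i ' ' = ch)).map (fun i => p ++ [i])))

def find_bananas_alt (s : String) : List String :=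
  let l := s.toList
  let n := l.length
  let partials := pvTargetB.foldl (stepB l n) [[]]
  partials.map (fun idxs =>
    String.mk ((pvTargetB.zip idxs).foldl (fun buf ci => buf.set ci.2 ci.1)
      (List.replicate n '-')))

-- ===== PRECONDITION & SPEC =====
def Spec_find_bananas (s : String) (out : List String) : Prop := out = find_bananas_alt s
instance (s : String) (out : List String) : Decidable (Spec_find_bananas s out) := by unfold Spec_find_bananas; infer_instance

-- ===== CLAIM (what is proved, stated in full; the proofs are below) =====
def Claim_equal_find_bananas : Prop := ∀ (s : String), Dom_find_bananas s → Spec_find_bananas s (find_bananas s)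

-- ===== LEMMAS AND PROOFS =====

-- canonical spec: all increasing index lists in l matching the target, indices ≥ m, lex order
def ispec (l : List Char) : List Char → Nat → List (List Nat)
  | [], _ => [[]]
  | t :: ts, m =>
      ((List.range' m (l.length - m)).filter (fun i => l.getD i ' ' = t)).flatMap
        (fun i => (ispec l ts (i + 1)).map (fun is => i :: is))

-- the dash pattern that an index list (relative to start m) renders to, up to its last letter
def pat : Nat → List Nat → List Char → List Char
  | _, _, [] => []
  | _, [], _ :: _ => []
  | m, i :: is, t :: ts => List.replicate (i - m) '-' ++ t :: pat (i + 1) is ts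

theorem ispec_sound (l : List Char) : ∀ (ts : List Char) (m : Nat) (is : List Nat),
    is ∈ ispec l ts m →
    is.Pairwise (· < ·) ∧ (∀ i ∈ is, m ≤ i ∧ i < l.length) ∧ is.length = ts.length := by
  intro ts
  induction ts with
  | nil => intro m is h; simp [ispec] at h; simp [h]
  | cons t ts ih =>
    intro m is h
    simp only [ispec, List.mem_flatMap, List.mem_map] at h
    obtain ⟨i, hi, is₀, his₀, rfl⟩ := h
    have hir : i ∈ List.range' m (l.length - m) := List.mem_of_mem_filter hi
    have hmi : m ≤ i ∧ i < l.length := by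
      rw [List.mem_range'] at hir; omega
    obtain ⟨hp, hb, hl⟩ := ih (i + 1) is₀ his₀
    refine ⟨List.pairwise_cons.mpr ⟨fun x hx => ?_, hp⟩, ?_, by simp [hl]⟩
    · have := (hb x hx).1; omega
    · intro x hx
      rcases List.mem_cons.mp hx with rfl | hx
      · exact hmi
      · have h1 := (hb x hx).1
        exact ⟨by omega, (hb x hx).2⟩

-- head of a drop
theorem drop_cons_facts {l : List Char} {k : Nat} {c : Char} {r : List Char}
    (h : l.drop k = c :: r) : k < l.length ∧ l.getD k ' ' = c ∧ l.drop (k + 1) = r := by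
  have hk : k < l.length := by
    by_contra hk
    rw [List.drop_eq_nil_of_le (by omega)] at h
    simp at h
  have hget : l[k]? = some c := by
    have := congrArg List.head? h
    rwa [List.head?_drop] at this
  refine ⟨hk, ?_, ?_⟩
  · rw [List.getD_eq_getElem?_getD, hget]; rfl
  · have := congrArg List.tail h
    rwa [List.tail_drop] at this

-- A's loop over the suffix l.drop (m+j), assuming the recursion lemma one level deeper
theorem loopA_spec (l : List Char) (idx : Nat) (t : Char) (ts : List Char)
    (ht : pvTargetA.getD idx ' ' = t)
    (H : ∀ (m' : Nat) (path' : List (List Char)),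
      recA (idx + 1) path' (l.drop m') =
        (ispec l ts m').map (fun is => path'.flatten ++ pat m' is ts)) :
    ∀ (rest : List Char) (m j : Nat) (path : List (List Char)), rest = l.drop (m + j) →
    loopA idx path j rest =
      ((List.range' (m + j) (l.length - (m + j))).filter (fun i => l.getD i ' ' = t)).flatMap
        (fun i => (ispec l ts (i + 1)).map
          (fun is => path.flatten ++ (List.replicate (i - m) '-' ++ t :: pat (i + 1) is ts))) := by
  intro rest
  induction rest with
  | nil =>
    intro m j path h
    have : l.length ≤ m + j := by
      by_contra hk
      have := List.drop_eq_nil_iff.mp h.symm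
      omega
    simp [loopA, show l.length - (m + j) = 0 by omega]
  | cons c rest ih =>
    intro m j path h
    obtain ⟨hk, hc, hr⟩ := drop_cons_facts h.symm
    have hrange : List.range' (m + j) (l.length - (m + j)) =
        (m + j) :: List.range' (m + j + 1) (l.length - (m + j + 1)) := by
      rw [show l.length - (m + j) = (l.length - (m + j + 1)) + 1 by omega]
      rw [List.range'_succ]
    have hih : loopA idx path (j + 1) rest =
        ((List.range' (m + j + 1) (l.length - (m + j + 1))).filter
          (fun i => l.getD i ' ' = t)).flatMap
          (fun i => (ispec l ts (i + 1)).map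
            (fun is => path.flatten ++ (List.replicate (i - m) '-' ++ t :: pat (i + 1) is ts))) := by
      have h2 := ih m (j + 1) path (by exact hr.symm)
      rwa [show m + (j + 1) = m + j + 1 from rfl] at h2
    by_cases hct : c = t
    · rw [loopA, if_pos (by rw [ht]; exact hct), hih, hrange, List.filter_cons,
        if_pos (by simp only [decide_eq_true_eq, hc]; exact hct), List.flatMap_cons]
      congr 1
      rw [← hr, H (m + j + 1) (path ++ [List.replicate j '-' ++ [c]])]
      apply List.map_congr_left
      intro is _
      simp only [List.flatten_append, List.flatten_cons, List.flatten_nil, List.append_nil]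
      rw [hct, show m + j - m = j by omega]
      simp [List.append_assoc]
    · rw [loopA, if_neg (by rw [ht]; exact hct), hih, hrange, List.filter_cons,
        if_neg (by simp only [decide_eq_true_eq, hc]; exact hct), List.nil_append]

theorem recA_spec (l : List Char) : ∀ (ts : List Char) (idx : Nat),
    pvTargetA.drop idx = ts → idx ≤ pvTargetA.length →
    ∀ (m : Nat) (path : List (List Char)),
    recA idx path (l.drop m) = (ispec l ts m).map (fun is => path.flatten ++ pat m is ts) := by
  intro ts
  induction ts with
  | nil =>
    intro idx hdrop hle m path
    have : idx = pvTargetA.length := by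
      have h6 := List.drop_eq_nil_iff.mp hdrop
      omega
    rw [recA, if_pos this]
    simp [ispec, pat]
  | cons t ts ih =>
    intro idx hdrop hle m path
    have hlt : idx < pvTargetA.length := by
      rcases Nat.lt_or_ge idx pvTargetA.length with hlt | hge
      · exact hlt
      · rw [List.drop_eq_nil_of_le hge] at hdrop; simp at hdrop
    have ht : pvTargetA.getD idx ' ' = t := by
      have := congrArg List.head? hdrop
      rw [List.head?_drop] at this
      rw [List.getD_eq_getElem?_getD, this]; rfl
    have hts : pvTargetA.drop (idx + 1) = ts := by
      have := congrArg List.tail hdrop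
      rwa [List.tail_drop] at this
    rw [recA, if_neg (by omega)]
    have H := ih (idx + 1) hts (by omega)
    rw [loopA_spec l idx t ts ht H (l.drop m) m 0 path (by rw [Nat.add_zero])]
    simp only [Nat.add_zero, ispec, List.map_flatMap]
    congr 1
    funext i
    rw [List.map_map]
    apply List.map_congr_left
    intro is _
    simp [pat]

theorem set_replicate {α : Type} (d c : α) : ∀ (k r : Nat), r < k →
    (List.replicate k d).set r c = List.replicate r d ++ c :: List.replicate (k - (r + 1)) d := by
  intro k
  induction k with
  | zero => intro r hr; omega
  | succ k ih =>
    intro r hr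
    cases r with
    | zero => simp [List.replicate_succ]
    | succ r =>
      rw [List.replicate_succ, List.set_cons_succ, ih r (by omega)]
      simp [List.replicate_succ, show k + 1 - (r + 1 + 1) = k - (r + 1) by omega]

-- the buffer-rendering of a sorted index list equals dash pattern + padding
theorem render_spec (l : List Char) : ∀ (is : List Nat) (cs : List Char) (X : List Char) (m : Nat),
    X.length = m → is.Pairwise (· < ·) → (∀ i ∈ is, m ≤ i ∧ i < l.length) →
    (cs.zip is).foldl (fun buf ci => buf.set ci.2 ci.1) (X ++ List.replicate (l.length - m) '-') =
      X ++ pat m is cs ++ List.replicate (l.length - m - (pat m is cs).length) '-' := by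
  intro is
  induction is with
  | nil =>
    intro cs X m hX hp hb
    cases cs <;> simp [pat]
  | cons i is ih =>
    intro cs X m hX hp hb
    cases cs with
    | nil => simp [pat]
    | cons c cs =>
      obtain ⟨hmi, hin⟩ := hb i List.mem_cons_self
      simp only [List.zip_cons_cons, List.foldl_cons]
      have hset : (X ++ List.replicate (l.length - m) '-').set i c
          = (X ++ (List.replicate (i - m) '-' ++ [c])) ++ List.replicate (l.length - (i + 1)) '-' := by
        rw [List.set_append_right _ _ (by omega), hX,
          set_replicate '-' c (l.length - m) (i - m) (by omega)]
        simp [List.append_assoc, show l.length - m - (i - m + 1) = l.length - (i + 1) by omega]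
      rw [hset, ih cs (X ++ (List.replicate (i - m) '-' ++ [c])) (i + 1)
        (by simp [hX]; omega) hp.of_cons
        (by
          intro x hx
          have h1 := List.rel_of_pairwise_cons hp hx
          exact ⟨by omega, (hb x (List.mem_cons_of_mem i hx)).2⟩)]
      have hL : (pat m (i :: is) (c :: cs)).length
          = (i - m) + 1 + (pat (i + 1) is cs).length := by simp [pat]; omega
      rw [hL, show l.length - m - (i - m + 1 + (pat (i + 1) is cs).length)
          = l.length - (i + 1) - (pat (i + 1) is cs).length by omega]
      simp [pat, List.append_assoc]

-- B's foldl over the target characterized by ispec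
theorem foldl_stepB (l : List Char) : ∀ (ts : List Char) (P : List (List Nat)),
    ts.foldl (stepB l l.length) P =
      P.flatMap (fun p =>
        (ispec l ts (match p.getLast? with | some j => j + 1 | none => 0)).map
          (fun is => p ++ is)) := by
  intro ts
  induction ts with
  | nil =>
    intro P
    induction P with
    | nil => simp
    | cons p P ihP => simp_all [ispec]
  | cons t ts ih =>
    intro P
    rw [List.foldl_cons, ih]
    simp only [stepB]
    rw [List.flatMap_assoc]
    congr 1
    funext p
    rw [List.flatMap_map]
    have hstart : ∀ i : Nat,
        (match (p ++ [i]).getLast? with | some j => j + 1 | none => 0) = i + 1 := by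
      intro i
      rw [List.getLast?_concat]
    simp only [hstart, ispec, List.map_flatMap]
    congr 1
    funext i
    rw [List.map_map]
    apply List.map_congr_left
    intro is _
    simp

-- ===== VERDICT (by name: the statement is the Claim_ definition above) =====
theorem find_bananas_spec : Claim_equal_find_bananas := by
  intro s _
  simp only [Spec_find_bananas, find_bananas, find_bananas_alt]
  have hA := recA_spec s.toList pvTargetA 0 rfl (Nat.zero_le _) 0 []
  rw [List.drop_zero] at hA
  rw [show pvTargetB = pvTargetA from rfl]
  rw [hA, foldl_stepB s.toList pvTargetA [[]]]
  simp only [List.flatMap_cons, List.flatMap_nil, List.append_nil, List.map_map]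
  rw [show (match ([] : List Nat).getLast? with | some j => j + 1 | none => 0) = 0 from rfl]
  apply List.map_congr_left
  intro is his
  obtain ⟨hp, hb, hlen⟩ := ispec_sound s.toList pvTargetA 0 is his
  have hr := render_spec s.toList is pvTargetA [] 0 rfl hp hb
  simp only [List.nil_append, Nat.sub_zero, String.length_toList] at hr
  simp [Function.comp, hr]
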